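-- pv_equiv track=rewrite | github.com/MishraGarima/Assignments | SIC - Own Cryptography/Own_Cryptography.py | create_mat
-- ===== SOURCE A (Python) =====
-- def create_mat(lst):
--     mat = []
--     if((len(lst)%4)!=0):
--         for i in range(4-(len(lst)%4)):
--             lst.append("#")
--     for i in range(4):
--         row = []
--         for j in range(i,len(lst),4):
--             row.append(lst[j])
--         mat.append(row)
--     return mat
-- ===== SOURCE B (Python) =====
-- def create_mat(lst):
--     lst += ["#"] * ((-len(lst)) % 4)
--     r0, r1, r2, r3 = [], [], [], []
--     for i in range(0, len(lst), 4):
--         r0.append(lst[i])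
--         r1.append(lst[i + 1])
--         r2.append(lst[i + 2])
--         r3.append(lst[i + 3])
--     return [r0, r1, r2, r3]
-- ===== Notes on version B (the rewrite author's own statement) =====
-- stated objective: alternative
-- what changed: Pads with a single arithmetic extension ((-len)%4 copies of '#') instead of a conditional append loop, then replaces A's four separate strided passes with one pass over chunk starts (stride 4) that appends the four chunk members to four row accumulators at once.
import Mathlib
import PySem

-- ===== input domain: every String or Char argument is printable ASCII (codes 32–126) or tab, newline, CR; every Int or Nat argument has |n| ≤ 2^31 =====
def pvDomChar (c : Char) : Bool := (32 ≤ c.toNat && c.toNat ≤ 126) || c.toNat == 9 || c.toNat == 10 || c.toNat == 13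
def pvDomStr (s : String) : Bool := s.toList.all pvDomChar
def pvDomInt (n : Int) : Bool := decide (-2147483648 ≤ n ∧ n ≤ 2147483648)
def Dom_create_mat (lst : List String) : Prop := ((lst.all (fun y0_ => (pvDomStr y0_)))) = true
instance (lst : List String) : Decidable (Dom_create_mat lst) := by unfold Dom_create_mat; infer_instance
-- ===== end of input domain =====

-- B pads by arithmetic ((-len)%4 copies of '#') and makes ONE pass over chunk starts,
-- filling four row accumulators at once, instead of A's four strided passes (objective: alternative).
-- Both Pythons mutate lst in place identically; the theorems are about the return value.

-- ===== PORT A =====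
def create_mat (lst : List String) : List (List String) :=
  let lst2 :=
    if PySem.Int.mod (lst.length : Int) 4 ≠ 0 then
      (PySem.List.pyRange 0 (4 - PySem.Int.mod (lst.length : Int) 4) 1).foldl
        (fun l _ => l ++ ["#"]) lst
    else lst
  (PySem.List.pyRange 0 4 1).foldl
    (fun mat i =>
      mat ++ [(PySem.List.pyRange i (lst2.length : Int) 4).foldl
        (fun row j => row ++ [PySem.List.pyGetD lst2 j ""]) []]) []

-- ===== PORT B =====
def create_mat_alt (lst : List String) : List (List String) :=
  let lst2 := lst ++ List.replicate (PySem.Int.mod (-(lst.length : Int)) 4).toNat "#"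
  let r := (PySem.List.pyRange 0 (lst2.length : Int) 4).foldl
    (fun s i =>
      (s.1 ++ [PySem.List.pyGetD lst2 i ""],
       s.2.1 ++ [PySem.List.pyGetD lst2 (i + 1) ""],
       s.2.2.1 ++ [PySem.List.pyGetD lst2 (i + 2) ""],
       s.2.2.2 ++ [PySem.List.pyGetD lst2 (i + 3) ""]))
    ([], [], [], [])
  [r.1, r.2.1, r.2.2.1, r.2.2.2]

-- ===== PRECONDITION & SPEC =====
def Spec_create_mat (lst : List String) (out : List (List String)) : Prop := out = create_mat_alt lst
instance (lst : List String) (out : List (List String)) : Decidable (Spec_create_mat lst out) := by unfold Spec_create_mat; infer_instance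

-- ===== CLAIM (what is proved, stated in full; the proofs are below) =====
def Claim_equal_create_mat : Prop := ∀ (lst : List String), Dom_create_mat lst → Spec_create_mat lst (create_mat lst)

-- ===== LEMMAS AND PROOFS =====

/-- Split a list (whose length is a multiple of 4) into its four residue-class rows. -/
def dist4 : List String → List String × List String × List String × List String
  | a :: b :: c :: d :: rest =>
      let q := dist4 rest
      (a :: q.1, b :: q.2.1, c :: q.2.2.1, d :: q.2.2.2)
  | _ => ([], [], [], [])

def pick (i : Nat) (q : List String × List String × List String × List String) : List String :=
  [q.1, q.2.1, q.2.2.1, q.2.2.2].getD i []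

theorem foldl_pad {α : Type} (xs : List α) (l : List String) :
    xs.foldl (fun l _ => l ++ ["#"]) l = l ++ List.replicate xs.length "#" := by
  induction xs generalizing l with
  | nil => simp
  | cons x xs ih =>
    rw [List.foldl_cons, ih, List.append_assoc]
    rfl

theorem rowA (m : Nat) (l : List String) (i : Nat) (hi : i < 4) (h : l.length = 4 * m) :
    (List.range m).map (fun k => l.getD (i + 4 * k) "") = pick i (dist4 l) := by
  induction m generalizing l with
  | zero =>
    have : l = [] := List.eq_nil_of_length_eq_zero (by omega)
    subst this
    interval_cases i <;> simp [pick, dist4]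
  | succ m ih =>
    match l, h with
    | a :: b :: c :: d :: rest, h =>
      have hr : rest.length = 4 * m := by simp at h; omega
      rw [List.range_succ_eq_map, List.map_cons, List.map_map]
      have htail : ((List.range m).map ((fun k => (a :: b :: c :: d :: rest).getD (i + 4 * k) "") ∘ (· + 1)))
          = (List.range m).map (fun k => rest.getD (i + 4 * k) "") := by
        apply List.map_congr_left
        intro k _
        have : i + 4 * (k + 1) = (i + 4 * k) + 1 + 1 + 1 + 1 := by ring
        simp [Function.comp, this]
      rw [htail, ih rest hr]
      interval_cases i <;> simp [pick, dist4]

theorem rowA' (m : Nat) (l : List String) (i : Nat) (hi : i < 4) (h : l.length = 4 * m) :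
    (PySem.List.pyRange (i : Int) (l.length : Int) 4).foldl
        (fun row j => row ++ [PySem.List.pyGetD l j ""]) [] = pick i (dist4 l) := by
  rw [PySem.List.foldl_append_singleton_eq_map, PySem.List.pyRange_of_pos _ _ (by norm_num)]
  rw [List.map_map]
  rcases Nat.eq_zero_or_pos m with hm | hm
  · subst hm
    have : ¬ ((i : Int) < (l.length : Int)) := by omega
    rw [if_neg this]
    have : l = [] := List.eq_nil_of_length_eq_zero (by omega)
    subst this
    interval_cases i <;> simp [pick, dist4]
  · have hlt : (i : Int) < (l.length : Int) := by omega
    rw [if_pos hlt]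
    have hcnt : (((l.length : Int) - (i : Int) + 4 - 1) / 4).toNat = m := by omega
    rw [hcnt]
    rw [← rowA m l i hi h]
    apply List.map_congr_left
    intro k _
    have hc : (i : Int) + 4 * (k : Int) = ((i + 4 * k : Nat) : Int) := by push_cast; ring
    simp only [Function.comp_apply]
    rw [hc, PySem.List.pyGetD_natCast]

/-- A's core (the four strided passes) computes the four residue rows. -/
theorem coreA (m : Nat) (l : List String) (h : l.length = 4 * m) :
    (PySem.List.pyRange 0 4 1).foldl
        (fun mat i =>
          mat ++ [(PySem.List.pyRange i (l.length : Int) 4).foldl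
            (fun row j => row ++ [PySem.List.pyGetD l j ""]) []]) []
      = [pick 0 (dist4 l), pick 1 (dist4 l), pick 2 (dist4 l), pick 3 (dist4 l)] := by
  have hrange : PySem.List.pyRange 0 4 1 = [0, 1, 2, 3] := by decide
  rw [hrange]
  simp only [List.foldl_cons, List.foldl_nil, List.nil_append]
  have r0 := rowA' m l 0 (by norm_num) h
  have r1 := rowA' m l 1 (by norm_num) h
  have r2 := rowA' m l 2 (by norm_num) h
  have r3 := rowA' m l 3 (by norm_num) h
  push_cast at r0 r1 r2 r3
  rw [r0, r1, r2, r3]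
  simp

/-- One fold step per chunk, four appends at a time, unzipped into four maps. -/
theorem foldl_tuple4 (xs : List Int) (f0 f1 f2 f3 : Int → String)
    (a0 a1 a2 a3 : List String) :
    xs.foldl (fun s i => (s.1 ++ [f0 i], s.2.1 ++ [f1 i], s.2.2.1 ++ [f2 i], s.2.2.2 ++ [f3 i]))
        (a0, a1, a2, a3)
      = (a0 ++ xs.map f0, a1 ++ xs.map f1, a2 ++ xs.map f2, a3 ++ xs.map f3) := by
  induction xs generalizing a0 a1 a2 a3 with
  | nil => simp
  | cons x xs ih => simp [List.foldl_cons, ih]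

theorem rowB (m : Nat) (l : List String) (c : Nat) (hc : c < 4) (h : l.length = 4 * m) :
    (PySem.List.pyRange 0 (l.length : Int) 4).map
        (fun j => PySem.List.pyGetD l (j + (c : Int)) "") = pick c (dist4 l) := by
  rw [PySem.List.pyRange_of_pos _ _ (by norm_num), List.map_map]
  rcases Nat.eq_zero_or_pos m with hm | hm
  · subst hm
    have : ¬ ((0 : Int) < (l.length : Int)) := by omega
    rw [if_neg this]
    have : l = [] := List.eq_nil_of_length_eq_zero (by omega)
    subst this
    interval_cases c <;> simp [pick, dist4]
  · have hlt : (0 : Int) < (l.length : Int) := by omega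
    rw [if_pos hlt]
    have hcnt : (((l.length : Int) - 0 + 4 - 1) / 4).toNat = m := by omega
    rw [hcnt, ← rowA m l c hc h]
    apply List.map_congr_left
    intro k _
    have hcst : (0 : Int) + 4 * (k : Int) + (c : Int) = ((c + 4 * k : Nat) : Int) := by
      push_cast; ring
    simp only [Function.comp_apply]
    rw [hcst, PySem.List.pyGetD_natCast]

/-- B's core (one pass over chunk starts) also computes the four residue rows. -/
theorem coreB (m : Nat) (l : List String) (h : l.length = 4 * m) :
    ((PySem.List.pyRange 0 (l.length : Int) 4).foldl
        (fun s i =>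
          (s.1 ++ [PySem.List.pyGetD l i ""],
           s.2.1 ++ [PySem.List.pyGetD l (i + 1) ""],
           s.2.2.1 ++ [PySem.List.pyGetD l (i + 2) ""],
           s.2.2.2 ++ [PySem.List.pyGetD l (i + 3) ""]))
        (([], [], [], []) : List String × List String × List String × List String))
      = (pick 0 (dist4 l), pick 1 (dist4 l), pick 2 (dist4 l), pick 3 (dist4 l)) := by
  rw [foldl_tuple4 _ (fun i => PySem.List.pyGetD l i "") (fun i => PySem.List.pyGetD l (i + 1) "")
    (fun i => PySem.List.pyGetD l (i + 2) "") (fun i => PySem.List.pyGetD l (i + 3) "")]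
  have e0 : (PySem.List.pyRange 0 (l.length : Int) 4).map (fun i => PySem.List.pyGetD l i "")
      = (PySem.List.pyRange 0 (l.length : Int) 4).map (fun j => PySem.List.pyGetD l (j + (0 : Int)) "") := by
    apply List.map_congr_left; intro j _; rw [add_zero]
  have r0 := rowB m l 0 (by norm_num) h
  have r1 := rowB m l 1 (by norm_num) h
  have r2 := rowB m l 2 (by norm_num) h
  have r3 := rowB m l 3 (by norm_num) h
  push_cast at r0 r1 r2 r3
  rw [e0]
  push_cast
  rw [r0, r1, r2, r3]
  simp

/-- The two paddings produce the same list. -/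
theorem pad_eq (lst : List String) :
    (if PySem.Int.mod (lst.length : Int) 4 ≠ 0 then
        (PySem.List.pyRange 0 (4 - PySem.Int.mod (lst.length : Int) 4) 1).foldl
          (fun l _ => l ++ ["#"]) lst
      else lst)
      = lst ++ List.replicate (PySem.Int.mod (-(lst.length : Int)) 4).toNat "#" := by
  have hm : PySem.Int.mod ((lst.length : Nat) : Int) 4 = ((lst.length % 4 : Nat) : Int) :=
    PySem.Int.mod_natCast _ _
  have hneg : PySem.Int.mod (-(lst.length : Int)) 4 = (-(lst.length : Int)) % 4 :=
    PySem.Int.mod_eq_emod_of_pos (by norm_num)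
  split_ifs with hmod
  · rw [foldl_pad]
    congr 1
    rw [PySem.List.length_pyRange_one, hm, hneg]
    congr 1
    have hne : lst.length % 4 ≠ 0 := by
      intro h0; apply hmod; rw [hm, h0]; rfl
    omega
  · rw [hm] at hmod
    simp at hmod
    have : (-(lst.length : Int)) % 4 = 0 := by omega
    rw [hneg, this]
    simp

-- ===== VERDICT (by name: the statement is the Claim_ definition above) =====
theorem create_mat_spec : Claim_equal_create_mat := by
  intro lst _
  unfold Spec_create_mat create_mat create_mat_alt
  rw [pad_eq]
  set L := lst ++ List.replicate (PySem.Int.mod (-(lst.length : Int)) 4).toNat "#" with hL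
  have hneg : PySem.Int.mod (-(lst.length : Int)) 4 = (-(lst.length : Int)) % 4 :=
    PySem.Int.mod_eq_emod_of_pos (by norm_num)
  obtain ⟨m, hm⟩ : ∃ m, L.length = 4 * m := by
    refine ⟨L.length / 4, ?_⟩
    have h1 : L.length = lst.length + (PySem.Int.mod (-(lst.length : Int)) 4).toNat := by
      rw [hL]; simp
    rw [hneg] at h1
    omega
  rw [coreA m L hm]
  simp only [coreB m L hm]
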